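-- pv_equiv track=rewrite | github.com/GeoBobCa/BridgeMaster_v3 | src/hand_generator.py | format_pbn_hand
-- ===== SOURCE A (Python) =====
-- SUITS = ['S', 'H', 'D', 'C']
--
-- def format_pbn_hand(cards):
--     holding = {'S': [], 'H': [], 'D': [], 'C': []}
--     for card in cards:
--         holding[card[-1]].append(card[:-1])
--     order = "AKQJT98765432"
--     pbn_str = ""
--     for s in SUITS:
--         suit_cards = sorted(holding[s], key=lambda x: order.index(x) if x in order else 99)
--         pbn_str += "".join(suit_cards) + "."
--     return pbn_str[:-1]
-- ===== SOURCE B (Python) =====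
-- SUITS = ['S', 'H', 'D', 'C']
--
-- def format_pbn_hand(cards):
--     order = "AKQJT98765432"
--     # bucket sort: one bucket per position in the canonical rank string,
--     # plus a final bucket (13) for ranks not occurring in it
--     buckets = {s: [[] for _ in range(14)] for s in SUITS}
--     for card in cards:
--         rank = card[:-1]
--         k = order.find(rank)
--         buckets[card[-1]][k if k >= 0 else 13].append(rank)
--     return ".".join("".join(r for b in buckets[s] for r in b) for s in SUITS)
-- ===== Notes on version B (the rewrite author's own statement) =====
-- stated objective: alternative
-- what changed: Replaces the per-suit comparison sort (sorted with an order.index key) by a bucket sort: each rank goes into one of 14 buckets (its position in the canonical rank string, or a final bucket for unknown ranks) and the buckets are concatenated, preserving insertion order within a bucket exactly as the stable sort does.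
import Mathlib
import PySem

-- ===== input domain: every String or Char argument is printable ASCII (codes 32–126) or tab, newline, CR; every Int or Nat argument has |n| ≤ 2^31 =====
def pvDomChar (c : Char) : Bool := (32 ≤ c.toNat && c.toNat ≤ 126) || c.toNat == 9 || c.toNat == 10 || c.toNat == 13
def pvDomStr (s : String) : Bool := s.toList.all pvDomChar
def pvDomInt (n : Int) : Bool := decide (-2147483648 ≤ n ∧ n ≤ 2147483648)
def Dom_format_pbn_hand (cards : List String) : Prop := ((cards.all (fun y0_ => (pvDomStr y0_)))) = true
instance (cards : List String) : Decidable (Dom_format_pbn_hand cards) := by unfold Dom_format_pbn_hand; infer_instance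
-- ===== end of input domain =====

-- B replaces A's per-suit comparison sort (key = position in "AKQJT98765432", 99 if absent)
-- by a bucket sort into 14 buckets (position in the rank string, unknown ranks in the last
-- bucket), concatenated in bucket order; same output, no comparison sort.

-- ===== PORT A =====
def pvSuits : List String := ["S", "H", "D", "C"]

-- key=lambda x: order.index(x) if x in order else 99   ('in'/'index' are substring tests; index = find when present)
def pvAKey (x : String) : Int :=
  if PySem.Str.isIn x "AKQJT98765432" then PySem.Str.find "AKQJT98765432" x else 99

-- loop body of A: holding[card[-1]].append(card[:-1]); the 'none' branches are where
-- Python raises (IndexError on card == '', KeyError on a suit not in SHDC), excluded by Pre_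
def pvStepA (d : PySem.Dict String (List String)) (card : String) :
    PySem.Dict String (List String) :=
  match PySem.Str.pyGet? card (-1) with
  | none => d
  | some ch =>
    match d.get? (String.ofList [ch]) with
    | none => d
    | some l => d.insert (String.ofList [ch]) (l ++ [PySem.Str.slice card none (some (-1))])

def format_pbn_hand (cards : List String) : String :=
  let holding : PySem.Dict String (List String) :=
    PySem.Dict.ofList [("S", []), ("H", []), ("D", []), ("C", [])]
  let holding := cards.foldl pvStepA holding
  let pbn_str := pvSuits.foldl (fun acc s =>
    let suit_cards := PySem.List.sorted ((holding.get? s).getD []) pvAKey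
    acc ++ PySem.Str.join "" suit_cards ++ ".") ""
  PySem.Str.slice pbn_str none (some (-1))

-- ===== PORT B =====
-- k = order.find(rank); bucket index k if k >= 0 else 13
def pvBIdx (x : String) : Int :=
  let k := PySem.Str.find "AKQJT98765432" x
  if k ≥ 0 then k else 13

-- loop body of B: buckets[card[-1]][k if k >= 0 else 13].append(rank); 'none' branches as in A
def pvStepB (d : PySem.Dict String (List (List String))) (card : String) :
    PySem.Dict String (List (List String)) :=
  match PySem.Str.pyGet? card (-1) with
  | none => d
  | some ch =>
    match d.get? (String.ofList [ch]) with
    | none => d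
    | some bl =>
      let rank := PySem.Str.slice card none (some (-1))
      let k := (pvBIdx rank).toNat
      d.insert (String.ofList [ch]) (bl.set k (bl.getD k [] ++ [rank]))

def format_pbn_hand_alt (cards : List String) : String :=
  let buckets : PySem.Dict String (List (List String)) :=
    PySem.Dict.ofList (pvSuits.map (fun s => (s, List.replicate 14 [])))
  let buckets := cards.foldl pvStepB buckets
  PySem.Str.join "." (pvSuits.map (fun s =>
    PySem.Str.join "" (((buckets.get? s).getD []).flatten)))

-- ===== PRECONDITION & SPEC =====
-- Pre_ excludes exactly the inputs where A raises: a card that is the empty string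
-- (IndexError on card[-1]) or whose last character is not one of S/H/D/C (KeyError).
def Pre_format_pbn_hand (cards : List String) : Prop :=
  ∀ c ∈ cards,
    ((PySem.Str.pyGet? c (-1)).map
      (fun ch => decide (ch ∈ (['S', 'H', 'D', 'C'] : List Char)))).getD false = true
instance (cards : List String) : Decidable (Pre_format_pbn_hand cards) := by
  unfold Pre_format_pbn_hand; infer_instance

def pvWitness_format_pbn_hand : List String := ["AS", "KH", "10D", "2C", "QS"]

def Spec_format_pbn_hand (cards : List String) (out : String) : Prop := out = format_pbn_hand_alt cards
instance (cards : List String) (out : String) : Decidable (Spec_format_pbn_hand cards out) := by unfold Spec_format_pbn_hand; infer_instance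

-- ===== CLAIM (what is proved, stated in full; the proofs are below) =====
def Claim_equal_format_pbn_hand : Prop := ∀ (cards : List String), Dom_format_pbn_hand cards → Pre_format_pbn_hand cards → Spec_format_pbn_hand cards (format_pbn_hand cards)

-- ===== LEMMAS AND PROOFS =====

-- the rank of a card, and whether a card belongs to suit t
def pvRank (c : String) : String := PySem.Str.slice c none (some (-1))

def pvSel (t : String) (c : String) : Bool :=
  match PySem.Str.pyGet? c (-1) with
  | none => false
  | some ch => String.ofList [ch] == t

def pvRanks (t : String) (cards : List String) : List String :=
  (cards.filter (pvSel t)).map pvRank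

-- bucket index as a Nat
def pvBk (x : String) : Nat := (pvBIdx x).toNat

-- bucket concatenation (what B's flatten produces)
def pvS (l : List String) : List String :=
  (List.range 14).flatMap (fun i => l.filter (fun r => pvBk r == i))

-- B's bucket table after processing rank list l starting from table v
def pvM (v : List (List String)) (l : List String) : List (List String) :=
  (List.range 14).map (fun i => v.getD i [] ++ l.filter (fun r => pvBk r == i))

-- key dichotomy: either the rank occurs in the order string (A-key = bucket ≤ 12)
-- or it does not (A-key 99, bucket 13)
theorem pvKey_cases (x : String) :
    (pvAKey x = pvBIdx x ∧ 0 ≤ pvBIdx x ∧ pvBIdx x ≤ 12) ∨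
    (pvAKey x = 99 ∧ pvBIdx x = 13) := by
  by_cases h : PySem.Str.isIn x "AKQJT98765432" = true
  · left
    have hinf := (PySem.Str.isIn_iff_infix x _).mp h
    have hnn : 0 ≤ PySem.Chars.find "AKQJT98765432".toList x.toList :=
      (PySem.Chars.find_nonneg_iff _ _).mpr hinf
    have hle : PySem.Chars.find "AKQJT98765432".toList x.toList ≤ 13 := by
      have := PySem.Chars.find_le_length "AKQJT98765432".toList x.toList
      simpa using this
    have hne : PySem.Chars.find "AKQJT98765432".toList x.toList ≠ 13 := by
      intro h13
      have hspec := (PySem.Chars.find_spec (s := "AKQJT98765432".toList)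
        (sub := x.toList) hnn).1
      rw [h13] at hspec
      have hxnil : x.toList = [] := by simpa using hspec
      rw [hxnil, PySem.Chars.find_nil] at h13
      exact absurd h13 (by decide)
    have hfind : PySem.Str.find "AKQJT98765432" x
        = PySem.Chars.find "AKQJT98765432".toList x.toList := PySem.Str.find_eq _ _
    refine ⟨?_, ?_, ?_⟩ <;> simp only [pvAKey, pvBIdx, h, if_true, hfind] <;> omega
  · right
    have h' : PySem.Str.isIn x "AKQJT98765432" = false := by
      simpa using h
    have hinf : ¬ x.toList <:+: "AKQJT98765432".toList := by
      intro hc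
      rw [(PySem.Str.isIn_iff_infix x _).mpr hc] at h'
      exact absurd h' (by decide)
    have hneg : PySem.Chars.find "AKQJT98765432".toList x.toList = -1 :=
      (PySem.Chars.find_eq_neg_one_iff _ _).mpr hinf
    have hfind : PySem.Str.find "AKQJT98765432" x
        = PySem.Chars.find "AKQJT98765432".toList x.toList := PySem.Str.find_eq _ _
    constructor <;> simp only [pvAKey, pvBIdx, h', hfind, hneg] <;> norm_num

theorem pvKey_lt_iff (a b : String) : (pvAKey a < pvAKey b) ↔ (pvBk a < pvBk b) := by
  rcases pvKey_cases a with ⟨h1, h2, h3⟩ | ⟨h1, h2⟩ <;>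
    rcases pvKey_cases b with ⟨g1, g2, g3⟩ | ⟨g1, g2⟩ <;>
      simp only [pvBk, h1, h2, g1, g2] <;> omega

theorem pvBk_le (x : String) : pvBk x ≤ 13 := by
  rcases pvKey_cases x with ⟨_, h2, h3⟩ | ⟨_, h2⟩ <;> simp only [pvBk, h2] <;> omega

-- insertBy skips a prefix none of whose elements come after x
theorem pvInsertBy_append (before : String → String → Bool) (x : String)
    (u v : List String) (h : ∀ y ∈ u, before x y = false) :
    PySem.List.insertBy before x (u ++ v) = u ++ PySem.List.insertBy before x v := by
  induction u with
  | nil => simp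
  | cons a u ih =>
    simp only [List.cons_append, PySem.List.insertBy, h a (by simp), ih
      (fun y hy => h y (by simp [hy]))]
    simp

theorem pvInsertBy_front (before : String → String → Bool) (x : String)
    (v : List String) (h : ∀ y ∈ v, before x y = true) :
    PySem.List.insertBy before x v = x :: v := by
  cases v with
  | nil => rfl
  | cons a v => simp [PySem.List.insertBy, h a (by simp)]

-- inserting x into the bucket concatenation of p appends x to its bucket
theorem pvS_insert (p : List String) (x : String) :
    PySem.List.insertBy (fun a b => decide (pvAKey a < pvAKey b)) x (pvS p)
      = pvS (p ++ [x]) := by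
  have hk : pvBk x ≤ 13 := pvBk_le x
  have hsplit : List.range 14
      = List.range (pvBk x + 1) ++ (List.range (13 - pvBk x)).map (fun j => (pvBk x + 1) + j) := by
    rw [← List.range_add]; congr 1; omega
  have hU : ∀ y ∈ (List.range (pvBk x + 1)).flatMap
      (fun i => p.filter (fun r => pvBk r == i)),
      decide (pvAKey x < pvAKey y) = false := by
    intro y hy
    simp only [List.mem_flatMap, List.mem_filter, List.mem_range, beq_iff_eq] at hy
    obtain ⟨i, hi, -, hbk⟩ := hy
    simp only [decide_eq_false_iff_not, pvKey_lt_iff]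
    omega
  have hV : ∀ y ∈ ((List.range (13 - pvBk x)).map (fun j => (pvBk x + 1) + j)).flatMap
      (fun i => p.filter (fun r => pvBk r == i)),
      decide (pvAKey x < pvAKey y) = true := by
    intro y hy
    simp only [List.mem_flatMap, List.mem_map, List.mem_filter, List.mem_range,
      beq_iff_eq] at hy
    obtain ⟨i, ⟨j, hj, hij⟩, -, hbk⟩ := hy
    simp only [decide_eq_true_eq, pvKey_lt_iff]
    omega
  conv_lhs => rw [pvS, hsplit, List.flatMap_append]
  rw [pvInsertBy_append _ _ _ _ hU, pvInsertBy_front _ _ _ hV]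
  have hfx : ∀ i : Nat, List.filter (fun r => pvBk r == i) [x]
      = if pvBk x == i then [x] else [] := by
    intro i; by_cases h : pvBk x = i <;>
      simp [beq_iff_eq, h]
  symm
  simp only [pvS]
  rw [hsplit, List.flatMap_append]
  rw [List.flatMap_congr (l := List.range (pvBk x + 1))
      (g := fun i => (p.filter (fun r => pvBk r == i))
        ++ (if pvBk x == i then [x] else []))
      (fun i _ => by simp only [List.filter_append, hfx]),
    List.flatMap_congr (l := (List.range (13 - pvBk x)).map (fun j => (pvBk x + 1) + j))
      (g := fun i => p.filter (fun r => pvBk r == i))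
      (by
        intro i hi
        simp only [List.mem_map, List.mem_range] at hi
        obtain ⟨j, hj, hij⟩ := hi
        have hne : (pvBk x == i) = false := by simp; omega
        simp [List.filter_append, hfx, hne])]
  rw [List.range_succ, List.flatMap_append, List.flatMap_append,
    List.flatMap_congr (l := List.range (pvBk x))
      (f := fun i => (p.filter (fun r => pvBk r == i))
        ++ (if pvBk x == i then [x] else []))
      (g := fun i => p.filter (fun r => pvBk r == i))
      (by
        intro i hi
        simp only [List.mem_range] at hi
        have hne : (pvBk x == i) = false := by simp; omega
        simp [hne])]
  simp [List.append_assoc]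

-- A's stable sort IS the bucket concatenation
theorem pvSort_eq (l : List String) : PySem.List.sorted l pvAKey = pvS l := by
  have main : ∀ (m p : List String),
      m.foldl (fun acc x =>
        PySem.List.insertBy (fun a b => decide (pvAKey a < pvAKey b)) x acc) (pvS p)
        = pvS (p ++ m) := by
    intro m
    induction m with
    | nil => intro p; simp
    | cons x m ih =>
      intro p
      rw [List.foldl_cons, pvS_insert, ih (p ++ [x]), List.append_assoc]
      rfl
  have h0 : pvS [] = [] := by simp [pvS]
  rw [PySem.List.sorted_eq_foldl_insertBy]
  have hm := main l []
  rw [h0] at hm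
  simpa using hm

theorem pvGetD_set (v : List (List String)) (k i : Nat) (x : List String)
    (h : k < v.length) :
    (v.set k x).getD i [] = if k = i then x else v.getD i [] := by
  rw [List.getD_eq_getElem?_getD, List.getElem?_set]
  split_ifs with h1 <;> simp_all [List.getD_eq_getElem?_getD]

-- appending a rank to its bucket in the table is consing it to the pending rank list
theorem pvM_set (v : List (List String)) (hlen : v.length = 14) (r : String)
    (l : List String) :
    pvM (v.set (pvBk r) (v.getD (pvBk r) [] ++ [r])) l = pvM v (r :: l) := by
  unfold pvM
  apply List.map_congr_left
  intro i hi
  simp only [List.mem_range] at hi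
  rw [pvGetD_set _ _ _ _ (by have := pvBk_le r; omega)]
  by_cases h : pvBk r = i
  · have hb : (pvBk r == i) = true := by simp [h]
    simp [h, List.append_assoc]
  · have hb : (pvBk r == i) = false := by simp [h]
    simp [h]

-- closed form of A's grouping loop at suit t
theorem pvA_loop (cards : List String) (d : PySem.Dict String (List String))
    (t : String) (v : List String) (hv : d.get? t = some v) :
    (cards.foldl pvStepA d).get? t = some (v ++ pvRanks t cards) := by
  induction cards generalizing d v with
  | nil => simpa [pvRanks] using hv
  | cons c cs ih =>
    rw [List.foldl_cons]
    cases h : PySem.List.pyGet? c.toList (-1) with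
    | none =>
      have hstep : pvStepA d c = d := by simp [pvStepA, h]
      have hsel : pvSel t c = false := by simp [pvSel, h]
      rw [hstep, ih d v hv]
      simp [pvRanks, hsel]
    | some ch =>
      by_cases hts : String.ofList [ch] = t
      · have hget : d.get? (String.ofList [ch]) = some v := by rw [hts]; exact hv
        have hstep : pvStepA d c = d.insert t (v ++ [pvRank c]) := by
          simp [pvStepA, h, hts, hv, pvRank]
        have hsel : pvSel t c = true := by simp [pvSel, h, hts]
        rw [hstep, ih _ _ (PySem.Dict.get?_insert_self d t (v ++ [pvRank c]))]
        simp [pvRanks, hsel, List.append_assoc]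
      · have hsel : pvSel t c = false := by simp [pvSel, h, hts]
        have hrk : pvRanks t (c :: cs) = pvRanks t cs := by
          simp [pvRanks, hsel]
        rw [hrk]
        cases hg : d.get? (String.ofList [ch]) with
        | none =>
          have hstep : pvStepA d c = d := by simp [pvStepA, h, hg]
          rw [hstep, ih d v hv]
        | some l =>
          have hstep : pvStepA d c = d.insert (String.ofList [ch])
              (l ++ [PySem.Str.slice c none (some (-1))]) := by
            simp [pvStepA, h, hg]
          have hv' : (d.insert (String.ofList [ch])
              (l ++ [PySem.Str.slice c none (some (-1))])).get? t = some v := by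
            rw [PySem.Dict.get?_insert_of_ne _ _ (fun he => hts he.symm)]
            exact hv
          rw [hstep, ih _ _ hv']

-- closed form of B's bucketing loop at suit t
theorem pvM_nil (v : List (List String)) (hlen : v.length = 14) : pvM v [] = v := by
  apply List.ext_getElem
  · simp [pvM, hlen]
  · intro i h1 h2
    simp only [pvM, List.filter_nil, List.append_nil, List.getElem_map, List.getElem_range]
    rw [List.getD_eq_getElem?_getD, List.getElem?_eq_getElem h2]
    rfl

theorem pvB_loop (cards : List String) (d : PySem.Dict String (List (List String)))
    (t : String) (v : List (List String)) (hv : d.get? t = some v)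
    (hlen : v.length = 14) :
    (cards.foldl pvStepB d).get? t = some (pvM v (pvRanks t cards)) := by
  induction cards generalizing d v with
  | nil => rw [List.foldl_nil, hv, pvRanks, List.filter_nil, List.map_nil, pvM_nil v hlen]
  | cons c cs ih =>
    rw [List.foldl_cons]
    cases h : PySem.List.pyGet? c.toList (-1) with
    | none =>
      have hstep : pvStepB d c = d := by simp [pvStepB, h]
      have hsel : pvSel t c = false := by simp [pvSel, h]
      rw [hstep, ih d v hv hlen]
      simp [pvRanks, hsel]
    | some ch =>
      by_cases hts : String.ofList [ch] = t
      · have hget : d.get? (String.ofList [ch]) = some v := by rw [hts]; exact hv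
        have hstep : pvStepB d c = d.insert t
            (v.set (pvBk (pvRank c)) (v.getD (pvBk (pvRank c)) [] ++ [pvRank c])) := by
          simp [pvStepB, h, hts, hv, pvRank, pvBk]
        have hsel : pvSel t c = true := by simp [pvSel, h, hts]
        rw [hstep, ih _ _ (PySem.Dict.get?_insert_self _ _ _) (by simp [hlen])]
        rw [pvM_set v hlen]
        simp [pvRanks, hsel]
      · have hsel : pvSel t c = false := by simp [pvSel, h, hts]
        have hrk : pvRanks t (c :: cs) = pvRanks t cs := by
          simp [pvRanks, hsel]
        rw [hrk]
        cases hg : d.get? (String.ofList [ch]) with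
        | none =>
          have hstep : pvStepB d c = d := by simp [pvStepB, h, hg]
          rw [hstep, ih d v hv hlen]
        | some bl =>
          have hstep : pvStepB d c = d.insert (String.ofList [ch])
              (bl.set (pvBk (pvRank c)) (bl.getD (pvBk (pvRank c)) [] ++ [pvRank c])) := by
            simp [pvStepB, h, hg, pvRank, pvBk]
          have hv' : (d.insert (String.ofList [ch])
              (bl.set (pvBk (pvRank c)) (bl.getD (pvBk (pvRank c)) [] ++ [pvRank c]))).get? t
              = some v := by
            rw [PySem.Dict.get?_insert_of_ne _ _ (fun he => hts he.symm)]
            exact hv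
          rw [hstep, ih _ _ hv' hlen]

-- glueing: A's "+ '.' each suit then drop last char" equals B's '.'-join
theorem pvGlue (a b c d : String) :
    PySem.Str.slice (("" ++ a ++ ".") ++ b ++ "." ++ c ++ "." ++ d ++ ".") none (some (-1))
      = PySem.Str.join "." [a, b, c, d] := by
  apply String.toList_inj.mp
  rw [PySem.Str.slice_to_neg_one]
  have hdot : (".":String).toList = ['.'] := rfl
  simp [String.toList_append, PySem.Str.toList_join, PySem.Chars.join_cons_cons,
    PySem.Chars.join_singleton, hdot, List.dropLast_append_of_ne_nil,
    List.dropLast_cons_of_ne_nil]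

-- ===== VERDICT (by name: the statement is the Claim_ definition above) =====
theorem pvM_flatten (l : List String) :
    (pvM (List.replicate 14 ([] : List String)) l).flatten = pvS l := by
  have hcg : ∀ i ∈ List.range 14,
      (List.replicate 14 ([] : List String)).getD i [] ++ l.filter (fun r => pvBk r == i)
        = l.filter (fun r => pvBk r == i) := by
    intro i hi
    simp only [List.mem_range] at hi
    rw [List.getD_eq_getElem?_getD, List.getElem?_replicate]
    simp [hi]
  rw [pvM, List.map_congr_left hcg, pvS, List.flatMap_def]

theorem format_pbn_hand_spec : Claim_equal_format_pbn_hand := by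
  intro cards _ _
  unfold Spec_format_pbn_hand format_pbn_hand format_pbn_hand_alt
  simp only [pvSuits, List.map_cons, List.map_nil, List.foldl_cons, List.foldl_nil]
  rw [pvA_loop cards _ "S" [] (by decide), pvA_loop cards _ "H" [] (by decide),
    pvA_loop cards _ "D" [] (by decide), pvA_loop cards _ "C" [] (by decide),
    pvB_loop cards _ "S" (List.replicate 14 []) (by decide) (by decide),
    pvB_loop cards _ "H" (List.replicate 14 []) (by decide) (by decide),
    pvB_loop cards _ "D" (List.replicate 14 []) (by decide) (by decide),
    pvB_loop cards _ "C" (List.replicate 14 []) (by decide) (by decide)]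
  simp only [Option.getD_some, List.nil_append, pvSort_eq, pvM_flatten]
  exact pvGlue _ _ _ _
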